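-- pv_equiv track=rewrite | github.com/danielvgz/POT232_LAB-M_PRACTICAS_PHP | actualiza_readme.py | determinar_estado_actual
-- ===== SOURCE A (Python) =====
-- def determinar_estado_actual(clases, hoy):
--     # Agrupa por semana
--     semanas = {}
--     for semana, clase, fecha, tema in clases:
--         if semana not in semanas:
--             semanas[semana] = []
--         semanas[semana].append((clase, fecha, tema))
--
--     semana_actual = None
--     clase_actual = None
--     fecha_actual = None
--     tema_actual = None
--
--     # Busca la semana más alta cuya primera clase ya haya ocurrido
--     for semana in sorted(semanas.keys()):
--         fechas_semana = [f for _, f, _ in semanas[semana]]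
--         if min(fechas_semana) <= hoy:
--             semana_actual = semana
--
--     if semana_actual is not None:
--         # Si hoy es igual o mayor que la primera clase de esa semana, mostrar la última clase de esa semana <= hoy
--         posibles = [(clase, fecha, tema) for clase, fecha, tema in semanas[semana_actual] if fecha <= hoy]
--         if posibles:
--             clase_actual, fecha_actual, tema_actual = max(posibles, key=lambda x: x[1])
--         else:
--             # Si no hay clases pasadas esta semana, toma la primera futura de esa semana
--             clase_actual, fecha_actual, tema_actual = min(semanas[semana_actual], key=lambda x: x[1])
--         return semana_actual, tema_actual, fecha_actual
--     return None, None, None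
-- ===== SOURCE B (Python) =====
-- def determinar_estado_actual(clases, hoy):
--     # Single linear scan: keep the qualifying class (fecha <= hoy) maximizing
--     # (semana, fecha) lexicographically; update only on strict increase so the
--     # first-encountered class wins ties.
--     mejor = None  # (semana, fecha, tema)
--     for semana, clase, fecha, tema in clases:
--         if fecha <= hoy:
--             if mejor is None or semana > mejor[0] or (semana == mejor[0] and fecha > mejor[1]):
--                 mejor = (semana, fecha, tema)
--     if mejor is None:
--         return None, None, None
--     return mejor[0], mejor[2], mejor[1]
-- ===== Notes on version B (the rewrite author's own statement) =====
-- stated objective: simpler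
-- what changed: Replaced the dict-grouping, sorted-week scan and per-week max/min passes by a single linear pass that keeps the class with fecha <= hoy maximizing (semana, fecha) lexicographically, updating only on strict increase so the first-encountered class wins ties.
import Mathlib
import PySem

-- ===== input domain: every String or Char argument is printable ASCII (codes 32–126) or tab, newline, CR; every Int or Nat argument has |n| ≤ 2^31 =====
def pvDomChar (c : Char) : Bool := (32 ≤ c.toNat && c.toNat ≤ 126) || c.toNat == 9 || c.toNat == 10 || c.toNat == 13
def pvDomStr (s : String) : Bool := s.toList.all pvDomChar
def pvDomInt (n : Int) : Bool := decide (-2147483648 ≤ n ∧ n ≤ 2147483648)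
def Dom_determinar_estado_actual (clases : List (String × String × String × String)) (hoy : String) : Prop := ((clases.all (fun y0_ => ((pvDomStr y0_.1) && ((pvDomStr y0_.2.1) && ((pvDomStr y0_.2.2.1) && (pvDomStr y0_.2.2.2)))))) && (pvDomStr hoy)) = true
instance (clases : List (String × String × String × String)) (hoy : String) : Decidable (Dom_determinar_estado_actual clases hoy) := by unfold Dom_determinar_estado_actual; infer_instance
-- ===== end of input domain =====

-- B replaces A's dict-grouping + sorted-keys scan + per-week max by ONE linear pass keeping the
-- qualifying class maximizing (semana, fecha) lexicographically (simpler; same return value).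

-- ===== PORT A =====
-- first loop of A: group classes by week (dict in insertion order)
def pvAgrupa (clases : List (String × String × String × String)) :
    PySem.Dict String (List (String × String × String)) :=
  clases.foldl (fun d x =>
    let d' := if d.contains x.1 then d else d.insert x.1 []
    d'.insert x.1 (d'.getD x.1 [] ++ [(x.2.1, x.2.2.1, x.2.2.2)])) PySem.Dict.empty

-- A's loop condition `min(fechas_semana) <= hoy`; `min?` is none only on an empty week list,
-- which never occurs in the dict pvAgrupa builds (Python's min would raise there)
def pvCond (semanas : PySem.Dict String (List (String × String × String))) (hoy : String)
    (w : String) : Bool :=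
  match PySem.List.min? ((semanas.getD w []).map (fun y => y.2.1)) id with
  | some m => decide (m ≤ hoy)
  | none => false

def determinar_estado_actual (clases : List (String × String × String × String)) (hoy : String) :
    Option String × Option String × Option String :=
  let semanas := pvAgrupa clases
  let semana_actual : Option String :=
    (PySem.List.sorted semanas.keys id).foldl
      (fun acc w => if pvCond semanas hoy w then some w else acc) none
  match semana_actual with
  | some w =>
    let posibles := (semanas.getD w []).filter (fun y => decide (y.2.1 ≤ hoy))
    match posibles with
    | _ :: _ =>
      -- `max(posibles, key=...)`; posibles is non-empty here so max? is some
      match PySem.List.max? posibles (fun y => y.2.1) with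
      | some y => (some w, some y.2.2, some y.2.1)
      | none => (none, none, none)
    | [] =>
      -- `min(semanas[semana_actual], key=...)`; the week list is non-empty (else Python raises)
      match PySem.List.min? (semanas.getD w []) (fun y => y.2.1) with
      | some y => (some w, some y.2.2, some y.2.1)
      | none => (none, none, none)
  | none => (none, none, none)

-- ===== PORT B =====
-- loop body of B: update the best (semana, fecha, tema) on a STRICT lexicographic increase
def pvMejorStep (mejor : Option (String × String × String))
    (x : String × String × String × String) : Option (String × String × String) :=
  match mejor with
  | none => some (x.1, x.2.2.1, x.2.2.2)
  | some m =>
    if m.1 < x.1 ∨ (x.1 = m.1 ∧ m.2.1 < x.2.2.1) then some (x.1, x.2.2.1, x.2.2.2) else some m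

def determinar_estado_actual_alt (clases : List (String × String × String × String))
    (hoy : String) : Option String × Option String × Option String :=
  let mejor := clases.foldl
    (fun mejor x => if x.2.2.1 ≤ hoy then pvMejorStep mejor x else mejor) none
  match mejor with
  | none => (none, none, none)
  | some m => (some m.1, some m.2.2, some m.2.1)

-- ===== PRECONDITION & SPEC =====
def Spec_determinar_estado_actual (clases : List (String × String × String × String)) (hoy : String) (out : Option String × Option String × Option String) : Prop := out = determinar_estado_actual_alt clases hoy
instance (clases : List (String × String × String × String)) (hoy : String) (out : Option String × Option String × Option String) : Decidable (Spec_determinar_estado_actual clases hoy out) := by unfold Spec_determinar_estado_actual; infer_instance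

-- ===== CLAIM (what is proved, stated in full; the proofs are below) =====
def Claim_equal_determinar_estado_actual : Prop := ∀ (clases : List (String × String × String × String)) (hoy : String), Dom_determinar_estado_actual clases hoy → Spec_determinar_estado_actual clases hoy (determinar_estado_actual clases hoy)

-- ===== LEMMAS AND PROOFS =====

-- the (semana, fecha) key, lexicographically ordered
def pvK (x : String × String × String × String) : Lex (String × String) := toLex (x.1, x.2.2.1)

def pvTri (x : String × String × String × String) : String × String × String :=
  (x.2.1, x.2.2.1, x.2.2.2)

-- x sits at a position of l with all earlier keys strictly below and all later keys not above
def pvGood (l : List (String × String × String × String))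
    (x : String × String × String × String) : Prop :=
  ∃ l1 l2, l = l1 ++ x :: l2 ∧ (∀ z ∈ l1, pvK z < pvK x) ∧ (∀ z ∈ l2, pvK z ≤ pvK x)

theorem pvGood_uniq {l : List (String × String × String × String)}
    {x x' : String × String × String × String}
    (h : pvGood l x) (h' : pvGood l x') : x = x' := by
  obtain ⟨a, b, rfl, ha, hb⟩ := h
  obtain ⟨a', b', he, ha', hb'⟩ := h'
  rcases List.append_eq_append_iff.1 he with ⟨as, h1, h2⟩ | ⟨bs, h1, h2⟩
  · cases as with
    | nil => exact (List.cons.injEq .. ▸ h2).1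
    | cons c cs =>
      cases h2
      have h3 := ha' x (by simp [h1])
      have h4 := hb x' (by simp)
      exact absurd h3 (not_lt_of_ge h4)
  · cases bs with
    | nil => exact ((List.cons.injEq .. ▸ h2).1).symm
    | cons c cs =>
      cases h2
      have h3 := ha x' (by simp [h1])
      have h4 := hb' x (by simp)
      exact absurd h3 (not_lt_of_ge h4)

theorem pvBfold_good (l : List (String × String × String × String)) :
    (l = [] ∧ l.foldl pvMejorStep none = none) ∨
    ∃ x, pvGood l x ∧ l.foldl pvMejorStep none = some (x.1, x.2.2.1, x.2.2.2) := by
  induction l using List.reverseRecOn with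
  | nil => exact Or.inl ⟨rfl, rfl⟩
  | append_singleton l x ih =>
    right
    rw [List.foldl_concat]
    rcases ih with ⟨rfl, hf⟩ | ⟨x0, ⟨a, b, rfl, ha, hb⟩, hf⟩
    · exact ⟨x, ⟨[], [], rfl, by simp, by simp⟩, by rw [hf]; rfl⟩
    · rw [hf]
      have hcond : (x0.1 < x.1 ∨ (x.1 = x0.1 ∧ x0.2.2.1 < x.2.2.1)) ↔ pvK x0 < pvK x := by
        rw [pvK, pvK, Prod.Lex.lt_iff]; simp [eq_comm]
      by_cases hlt : pvK x0 < pvK x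
      · refine ⟨x, ⟨a ++ x0 :: b, [], by simp, ?_, by simp⟩, ?_⟩
        · intro z hz
          rcases List.mem_append.1 hz with hz | hz
          · exact lt_trans (ha z hz) hlt
          · rcases List.mem_cons.1 hz with rfl | hz
            · exact hlt
            · exact lt_of_le_of_lt (hb z hz) hlt
        · show pvMejorStep (some (x0.1, x0.2.2.1, x0.2.2.2)) x = _
          rw [pvMejorStep]
          simp only [hcond.2 hlt, if_pos]
      · refine ⟨x0, ⟨a, b ++ [x], by simp, ha, ?_⟩, ?_⟩
        · intro z hz
          rcases List.mem_append.1 hz with hz | hz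
          · exact hb z hz
          · rcases List.mem_singleton.1 hz with rfl
            exact le_of_not_gt hlt
        · show pvMejorStep (some (x0.1, x0.2.2.1, x0.2.2.2)) x = _
          rw [pvMejorStep]
          rw [if_neg (by rw [hcond]; exact hlt)]

theorem pvAgrupa_spec (l : List (String × String × String × String)) :
    (∀ k, (pvAgrupa l).getD k [] = (l.filter (fun z => z.1 == k)).map pvTri)
    ∧ (∀ k, k ∈ (pvAgrupa l).keys ↔ k ∈ l.map (fun z => z.1))
    ∧ (pvAgrupa l).keys.Nodup := by
  induction l using List.reverseRecOn with
  | nil =>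
    refine ⟨fun k => ?_, fun k => ?_, ?_⟩ <;>
      simp [pvAgrupa, PySem.Dict.getD_empty, PySem.Dict.keys_empty]
  | append_singleton l x ih =>
    obtain ⟨hg, hm, hn⟩ := ih
    have hstep : pvAgrupa (l ++ [x]) =
        (let d' := if (pvAgrupa l).contains x.1 then pvAgrupa l else (pvAgrupa l).insert x.1 [];
         d'.insert x.1 (d'.getD x.1 [] ++ [(x.2.1, x.2.2.1, x.2.2.2)])) := by
      rw [pvAgrupa, pvAgrupa, List.foldl_concat]
    by_cases hc : (pvAgrupa l).contains x.1
    · rw [if_pos hc] at hstep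
      refine ⟨fun k => ?_, fun k => ?_, ?_⟩
      · by_cases hk : k = x.1
        · subst hk
          rw [hstep, PySem.Dict.getD_insert_self, hg _, List.filter_append, List.map_append]
          simp [pvTri]
        · have hb : (x.1 == k) = false := beq_eq_false_iff_ne.2 (fun e => hk e.symm)
          rw [hstep, PySem.Dict.getD_insert_of_ne _ _ _ hk, hg k, List.filter_append]
          simp [hb]
      · rw [hstep, ← PySem.Dict.contains_iff_mem_keys, PySem.Dict.contains_insert]
        simp [PySem.Dict.contains_iff_mem_keys, hm, or_comm]
      · rw [hstep, PySem.Dict.keys_insert_of_contains _ _ hc]; exact hn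
    · rw [if_neg hc] at hstep
      have hc' := Bool.eq_false_iff.2 hc
      have hx1 : x.1 ∉ (pvAgrupa l).keys := fun h =>
        hc ((PySem.Dict.contains_iff_mem_keys _ _).2 h)
      have hxl : x.1 ∉ l.map (fun z => z.1) := fun h => hx1 ((hm x.1).2 h)
      have hfil : l.filter (fun z => z.1 == x.1) = [] := by
        rw [List.filter_eq_nil_iff]
        intro z hz hbz
        exact hxl (List.mem_map.2 ⟨z, hz, beq_iff_eq.1 hbz⟩)
      have hkeys : (pvAgrupa (l ++ [x])).keys = (pvAgrupa l).keys ++ [x.1] := by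
        rw [hstep]
        rw [PySem.Dict.keys_insert_of_contains _ _ (PySem.Dict.contains_insert_self _ _ _),
            PySem.Dict.keys_insert_of_not_contains _ _ hc']
      refine ⟨fun k => ?_, fun k => ?_, ?_⟩
      · by_cases hk : k = x.1
        · subst hk
          rw [hstep, PySem.Dict.getD_insert_self, PySem.Dict.getD_insert_self,
              List.filter_append, hfil]
          simp [pvTri]
        · have hb : (x.1 == k) = false := beq_eq_false_iff_ne.2 (fun e => hk e.symm)
          rw [hstep, PySem.Dict.getD_insert_of_ne _ _ _ hk,
              PySem.Dict.getD_insert_of_ne _ _ _ hk, hg k, List.filter_append]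
          simp [hb]
      · rw [hkeys]
        simp [hm k, or_comm]
      · rw [hkeys]
        exact List.nodup_append.2 ⟨hn, List.nodup_singleton _, fun a ha b hb e => hx1 (((List.mem_singleton.1 hb) ▸ e) ▸ ha)⟩

theorem pvCond_iff (clases : List (String × String × String × String)) (hoy k : String) :
    pvCond (pvAgrupa clases) hoy k = true ↔
      ∃ x ∈ clases, x.1 = k ∧ x.2.2.1 ≤ hoy := by
  rw [pvCond, (pvAgrupa_spec clases).1 k]
  have hmap : ((clases.filter (fun z => z.1 == k)).map pvTri).map (fun y => y.2.1)
      = (clases.filter (fun z => z.1 == k)).map (fun z => z.2.2.1) := by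
    rw [List.map_map]; rfl
  rw [hmap]
  cases hmin : PySem.List.min? ((clases.filter (fun z => z.1 == k)).map (fun z => z.2.2.1)) id with
  | none =>
    rw [PySem.List.min?_eq_none_iff] at hmin
    simp only [Bool.false_eq_true, false_iff]
    rintro ⟨x, hx, rfl, hle⟩
    have : x.2.2.1 ∈ (clases.filter (fun z => z.1 == x.1)).map (fun z => z.2.2.1) :=
      List.mem_map.2 ⟨x, List.mem_filter.2 ⟨hx, beq_self_eq_true _⟩, rfl⟩
    rw [hmin] at this
    exact absurd this (List.not_mem_nil)
  | some m =>
    simp only [decide_eq_true_eq]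
    constructor
    · intro hle
      have hmem := PySem.List.min?_mem hmin
      obtain ⟨z, hz, rfl⟩ := List.mem_map.1 hmem
      obtain ⟨hzc, hzk⟩ := List.mem_filter.1 hz
      exact ⟨z, hzc, beq_iff_eq.1 hzk, hle⟩
    · rintro ⟨x, hx, rfl, hle⟩
      have hmem : x.2.2.1 ∈ (clases.filter (fun z => z.1 == x.1)).map (fun z => z.2.2.1) :=
        List.mem_map.2 ⟨x, List.mem_filter.2 ⟨hx, beq_self_eq_true _⟩, rfl⟩
      have := PySem.List.min?_isMin hmin _ hmem
      exact le_trans this hle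

theorem pvLastQual (P : String → Bool) (l : List String) (hp : l.Pairwise (· < ·)) :
    (l.foldl (fun acc w => if P w then some w else acc) none = none → ∀ k ∈ l, P k = false)
    ∧ (∀ w, l.foldl (fun acc w => if P w then some w else acc) none = some w →
        w ∈ l ∧ P w = true ∧ ∀ k ∈ l, P k = true → k ≤ w) := by
  induction l using List.reverseRecOn with
  | nil => exact ⟨fun _ k hk => absurd hk (List.not_mem_nil), fun w h => by simp at h⟩
  | append_singleton l x ih =>
    have hp' : l.Pairwise (· < ·) := (List.pairwise_append.1 hp).1
    have hlx : ∀ a ∈ l, a < x := fun a ha =>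
      (List.pairwise_append.1 hp).2.2 a ha x (List.mem_singleton.2 rfl)
    obtain ⟨ih1, ih2⟩ := ih hp'
    rw [List.foldl_concat]
    by_cases hx : P x
    · rw [if_pos hx]
      constructor
      · intro h; simp at h
      · intro w hw
        cases Option.some.injEq .. ▸ hw
        refine ⟨by simp, hx, fun k hk _ => ?_⟩
        rcases List.mem_append.1 hk with hk | hk
        · exact le_of_lt (hlx k hk)
        · rw [List.mem_singleton.1 hk]
    · rw [if_neg (by simp [hx])]
      constructor
      · intro h k hk
        rcases List.mem_append.1 hk with hk | hk
        · exact ih1 h k hk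
        · rw [List.mem_singleton.1 hk]; exact Bool.eq_false_iff.2 (by simpa using hx)
      · intro w hw
        obtain ⟨h1, h2, h3⟩ := ih2 w hw
        refine ⟨List.mem_append.2 (Or.inl h1), h2, fun k hk hPk => ?_⟩
        rcases List.mem_append.1 hk with hk | hk
        · exact h3 k hk hPk
        · rw [List.mem_singleton.1 hk] at hPk; exact absurd hPk (by simpa using hx)

theorem pvFoldMax_char {α : Type} (key : α → String) (l : List α) :
    (l = [] ∧ PySem.List.max? l key = none) ∨
    ∃ m l1 l2, PySem.List.max? l key = some m ∧ l = l1 ++ m :: l2 ∧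
      (∀ y ∈ l1, key y < key m) ∧ (∀ y ∈ l2, key y ≤ key m) := by
  rw [PySem.List.max?.eq_1]
  induction l using List.reverseRecOn with
  | nil => exact Or.inl ⟨rfl, rfl⟩
  | append_singleton l x ih =>
    right
    rw [List.foldl_concat]
    rcases ih with ⟨rfl, hf⟩ | ⟨m, a, b, hf, rfl, ha, hb⟩
    · exact ⟨x, [], [], by rw [hf], rfl, by simp, by simp⟩
    · rw [hf]
      by_cases hlt : key m < key x
      · refine ⟨x, a ++ m :: b, [], ?_, by simp, ?_, by simp⟩
        · simp only [hlt, if_pos]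
        · intro z hz
          rcases List.mem_append.1 hz with hz | hz
          · exact lt_trans (ha z hz) hlt
          · rcases List.mem_cons.1 hz with rfl | hz
            · exact hlt
            · exact lt_of_le_of_lt (hb z hz) hlt
      · refine ⟨m, a, b ++ [x], by show (if key m < key x then some x else some m) = some m; rw [if_neg hlt], by simp, ha, ?_⟩
        intro z hz
        rcases List.mem_append.1 hz with hz | hz
        · exact hb z hz
        · rw [List.mem_singleton.1 hz]; exact le_of_not_gt hlt

theorem pvSortedKeysLt (l : List String) (hn : l.Nodup) :
    (PySem.List.sorted l id).Pairwise (· < ·) := by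
  have h1 := PySem.List.sorted_pairwise (κ := String) l id
  have h2 : (PySem.List.sorted l id).Pairwise (fun a b => a ≠ b) :=
    ((PySem.List.sorted_perm l id false).nodup_iff).2 hn
  exact (h1.and h2).imp (fun h => lt_of_le_of_ne h.1 h.2)

theorem pvK_lt_iff (z x : String × String × String × String) :
    pvK z < pvK x ↔ z.1 < x.1 ∨ (z.1 = x.1 ∧ z.2.2.1 < x.2.2.1) := by
  rw [pvK, pvK, Prod.Lex.lt_iff]
  exact Iff.rfl

theorem pvK_le_iff (z x : String × String × String × String) :
    pvK z ≤ pvK x ↔ z.1 < x.1 ∨ (z.1 = x.1 ∧ z.2.2.1 ≤ x.2.2.1) := by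
  rw [pvK, pvK, Prod.Lex.le_iff]
  exact Iff.rfl

theorem pvMain (clases : List (String × String × String × String)) (hoy : String) :
    determinar_estado_actual clases hoy = determinar_estado_actual_alt clases hoy := by
  obtain ⟨hg, hm, hn⟩ := pvAgrupa_spec clases
  -- B in terms of the fold of pvMejorStep over the qualifying sublist q
  have hfun : (fun (mejor : Option (String × String × String))
        (x : String × String × String × String) =>
        if x.2.2.1 ≤ hoy then pvMejorStep mejor x else mejor)
      = (fun mejor x =>
        if (fun z : String × String × String × String => decide (z.2.2.1 ≤ hoy)) x = true
        then pvMejorStep mejor x else mejor) := by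
    funext mejor x; simp
  have hBalt : determinar_estado_actual_alt clases hoy =
      match (clases.filter (fun x => decide (x.2.2.1 ≤ hoy))).foldl pvMejorStep none with
      | none => (none, none, none)
      | some m => (some m.1, some m.2.2, some m.2.1) := by
    rw [determinar_estado_actual_alt, hfun, ← List.foldl_filter]
  have hq := pvLastQual (pvCond (pvAgrupa clases) hoy) _ (pvSortedKeysLt _ hn)
  rw [hBalt]
  simp only [determinar_estado_actual]
  split
  case h_2 hsa =>
    have h1 := hq.1 hsa
    have hqnil : clases.filter (fun x => decide (x.2.2.1 ≤ hoy)) = [] := by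
      rw [List.filter_eq_nil_iff]
      intro z hz hdz
      have hcz : pvCond (pvAgrupa clases) hoy z.1 = true :=
        (pvCond_iff clases hoy z.1).2 ⟨z, hz, rfl, of_decide_eq_true hdz⟩
      have hzin : z.1 ∈ PySem.List.sorted (pvAgrupa clases).keys id :=
        ((PySem.List.sorted_perm _ id false).mem_iff).2 ((hm z.1).2 (List.mem_map.2 ⟨z, hz, rfl⟩))
      rw [h1 z.1 hzin] at hcz
      exact Bool.false_ne_true hcz
    rw [hqnil]
    rfl
  case h_1 w hsa =>
    obtain ⟨hwmem, hcw, hwmax⟩ := hq.2 w hsa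
    obtain ⟨x0, hx0c, hx0w, hx0le⟩ := (pvCond_iff clases hoy w).1 hcw
    have hpos : ((pvAgrupa clases).getD w []).filter (fun y => decide (y.2.1 ≤ hoy))
        = ((clases.filter (fun x => decide (x.2.2.1 ≤ hoy))).filter
            (fun z => z.1 == w)).map pvTri := by
      rw [hg w, List.filter_map]
      rw [List.filter_filter, List.filter_filter]
      exact congrArg _ (List.filter_congr (fun x _ => by simp [pvTri, Bool.and_comm]))
    have hzb : ∀ z ∈ clases.filter (fun x => decide (x.2.2.1 ≤ hoy)), z.1 ≤ w := by
      intro z hz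
      obtain ⟨hzc, hzq⟩ := List.mem_filter.1 hz
      have hcz : pvCond (pvAgrupa clases) hoy z.1 = true :=
        (pvCond_iff clases hoy z.1).2 ⟨z, hzc, rfl, of_decide_eq_true hzq⟩
      have hzin : z.1 ∈ PySem.List.sorted (pvAgrupa clases).keys id :=
        ((PySem.List.sorted_perm _ id false).mem_iff).2
          ((hm z.1).2 (List.mem_map.2 ⟨z, hzc, rfl⟩))
      exact hwmax z.1 hzin hcz
    have hx0q : x0 ∈ clases.filter (fun x => decide (x.2.2.1 ≤ hoy)) :=
      List.mem_filter.2 ⟨hx0c, decide_eq_true hx0le⟩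
    have hx0qw : x0 ∈ (clases.filter (fun x => decide (x.2.2.1 ≤ hoy))).filter
        (fun z => z.1 == w) := List.mem_filter.2 ⟨hx0q, beq_iff_eq.2 hx0w⟩
    split
    case h_2 hpl =>
      exfalso
      rw [hpos, List.map_eq_nil_iff] at hpl
      rw [hpl] at hx0qw
      exact List.not_mem_nil hx0qw
    case h_1 p ps hpl =>
      rcases pvFoldMax_char (fun y : String × String × String => y.2.1)
          (((pvAgrupa clases).getD w []).filter (fun y => decide (y.2.1 ≤ hoy))) with
        ⟨hnil, _⟩ | ⟨m, P1, P2, hmax, hsplit, hP1, hP2⟩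
      · rw [hpl] at hnil; exact absurd hnil (List.cons_ne_nil p ps)
      rw [hmax]
      rw [hpos] at hsplit
      obtain ⟨B1, B2', hqw, hB1, hB2'⟩ := List.map_eq_append_iff.1 hsplit
      obtain ⟨xa, B2, hB2'eq, hxam, hB2⟩ := List.map_eq_cons_iff.1 hB2'
      rw [hB2'eq] at hqw
      obtain ⟨Q1, Q2, hqeq, hfQ1, hfQ2⟩ := List.filter_eq_append_iff.1 hqw
      obtain ⟨q21, q22, hQ2eq, hq21, hxaw, hfq22⟩ := List.filter_eq_cons_iff.1 hfQ2
      have hxaw' : xa.1 = w := beq_iff_eq.1 hxaw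
      have hqdec : clases.filter (fun x => decide (x.2.2.1 ≤ hoy))
          = (Q1 ++ q21) ++ xa :: q22 := by
        rw [hqeq, hQ2eq, List.append_assoc]
      have hgoodA : pvGood (clases.filter (fun x => decide (x.2.2.1 ≤ hoy))) xa := by
        refine ⟨Q1 ++ q21, q22, hqdec, ?_, ?_⟩
        · intro z hz
          have hzq : z ∈ clases.filter (fun x => decide (x.2.2.1 ≤ hoy)) := by
            rw [hqdec]; exact List.mem_append.2 (Or.inl hz)
          rcases lt_or_eq_of_le (hzb z hzq) with hlt | heq
          · exact (pvK_lt_iff z xa).2 (Or.inl (hxaw' ▸ hlt))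
          · rcases List.mem_append.1 hz with hz1 | hz2
            · have hzB1 : z ∈ B1 := by
                rw [← hfQ1]
                exact List.mem_filter.2 ⟨hz1, beq_iff_eq.2 heq⟩
              have : pvTri z ∈ P1 := by rw [← hB1]; exact List.mem_map.2 ⟨z, hzB1, rfl⟩
              have hlt' := hP1 _ this
              rw [← hxam] at hlt'
              exact (pvK_lt_iff z xa).2 (Or.inr ⟨heq.trans hxaw'.symm, hlt'⟩)
            · exact absurd (beq_iff_eq.2 heq) (by simpa using hq21 z hz2)
        · intro z hz
          have hzq : z ∈ clases.filter (fun x => decide (x.2.2.1 ≤ hoy)) := by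
            rw [hqdec]; exact List.mem_append.2 (Or.inr (List.mem_cons.2 (Or.inr hz)))
          rcases lt_or_eq_of_le (hzb z hzq) with hlt | heq
          · exact le_of_lt ((pvK_lt_iff z xa).2 (Or.inl (hxaw' ▸ hlt)))
          · have hzB2 : z ∈ B2 := by
              rw [← hfq22]
              exact List.mem_filter.2 ⟨hz, beq_iff_eq.2 heq⟩
            have : pvTri z ∈ P2 := by rw [← hB2]; exact List.mem_map.2 ⟨z, hzB2, rfl⟩
            have hle' := hP2 _ this
            rw [← hxam] at hle'
            exact (pvK_le_iff z xa).2 (Or.inr ⟨heq.trans hxaw'.symm, hle'⟩)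
      rcases pvBfold_good (clases.filter (fun x => decide (x.2.2.1 ≤ hoy))) with
        ⟨hqnil, _⟩ | ⟨xb, hgoodB, hbf⟩
      · rw [hqnil] at hx0q; exact absurd hx0q (List.not_mem_nil)
      rw [hbf]
      cases pvGood_uniq hgoodB hgoodA
      rw [← hxam]
      simp [pvTri, hxaw']


-- ===== VERDICT (by name: the statement is the Claim_ definition above) =====
theorem determinar_estado_actual_spec : Claim_equal_determinar_estado_actual := by
  intro clases hoy _
  unfold Spec_determinar_estado_actual
  exact pvMain clases hoy
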